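-- pv_equiv track=rewrite | github.com/TammiDai/count-number-of-heads-after-several-round-of-flips | number of heads.py | heads
-- ===== SOURCE A (Python) =====
-- def heads(n):
--     head=True  #heads set to True
--     tail=False  #tails set to False
--     coins=[head]*n
--     for i in range(2,n+1):
--         j=1
--         while i*j<=n:
--             coins[i*j-1]= not coins[i*j-1]  # if true, make the opposite status
--             j+=1
--
--     return coins
-- ===== SOURCE B (Python) =====
-- def heads(n):
--     # position m (1-based) ends heads-up iff m is a perfect square
--     coins = [False] * n
--     k = 1
--     while k * k <= n:
--         coins[k * k - 1] = True
--         k += 1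
--     return coins
-- ===== Notes on version B (the rewrite author's own statement) =====
-- stated objective: faster
-- what changed: Replaces the sieve of toggling every multiple of every i in 2..n by directly marking the perfect-square positions (a coin ends heads-up iff its 1-based position has an odd number of divisors, i.e. is a perfect square), one sqrt(n)-length marking loop over a False array.
import Mathlib
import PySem

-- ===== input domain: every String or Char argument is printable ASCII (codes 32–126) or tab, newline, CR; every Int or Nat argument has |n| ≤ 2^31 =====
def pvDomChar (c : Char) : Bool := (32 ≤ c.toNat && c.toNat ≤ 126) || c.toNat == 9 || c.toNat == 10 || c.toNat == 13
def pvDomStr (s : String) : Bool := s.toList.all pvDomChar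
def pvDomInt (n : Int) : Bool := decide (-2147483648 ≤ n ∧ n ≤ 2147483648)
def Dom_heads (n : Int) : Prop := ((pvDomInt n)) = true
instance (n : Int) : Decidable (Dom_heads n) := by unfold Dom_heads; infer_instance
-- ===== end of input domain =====

-- B replaces A's toggle-every-multiple sieve by directly marking the perfect-square
-- positions (1-based position m ends heads-up iff m is a perfect square).

-- ===== PORT A =====
-- inner `while i*j<=n: coins[i*j-1] = not coins[i*j-1]; j += 1`
-- (the `1 ≤ i` conjunct is only a totality guard; every call has i ≥ 2)
def headsInner (n i j : Int) (coins : List Bool) : List Bool :=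
  if h : 1 ≤ i ∧ i * j ≤ n then
    headsInner n i (j + 1)
      (coins.set (i * j - 1).toNat (! coins.getD (i * j - 1).toNat false))
  else coins
termination_by (n + 1 - i * j).toNat
decreasing_by
  have : i * (j + 1) = i * j + i := by ring
  omega

def heads (n : Int) : List Bool :=
  (PySem.List.pyRange 2 (n + 1) 1).foldl
    (fun coins i => headsInner n i 1 coins)
    (List.replicate n.toNat true)

-- ===== PORT B =====
-- `while k*k <= n: coins[k*k-1] = True; k += 1`
-- (the `1 ≤ k` conjunct is only a totality guard; the loop starts at k = 1)
def headsAltInner (n k : Int) (coins : List Bool) : List Bool :=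
  if h : 1 ≤ k ∧ k * k ≤ n then
    headsAltInner n (k + 1) (coins.set (k * k - 1).toNat true)
  else coins
termination_by (n + 1 - k * k).toNat
decreasing_by
  have : (k + 1) * (k + 1) = k * k + 2 * k + 1 := by ring
  omega

def heads_alt (n : Int) : List Bool :=
  headsAltInner n 1 (List.replicate n.toNat false)

-- ===== PRECONDITION & SPEC =====
def Spec_heads (n : Int) (out : List Bool) : Prop := out = heads_alt n
instance (n : Int) (out : List Bool) : Decidable (Spec_heads n out) := by unfold Spec_heads; infer_instance

-- ===== CLAIM (what is proved, stated in full; the proofs are below) =====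
def Claim_equal_heads : Prop := ∀ (n : Int), Dom_heads n → Spec_heads n (heads n)

-- ===== LEMMAS AND PROOFS =====

lemma getD_set_bool (l : List Bool) (i j : Nat) (a : Bool) (hi : i < l.length) :
    (l.set i a).getD j false = if i = j then a else l.getD j false := by
  simp [List.getD_eq_getElem?_getD, List.getElem?_set]
  split_ifs with h1 <;> simp_all

lemma headsInner_length (n i j : Int) (coins : List Bool) :
    (headsInner n i j coins).length = coins.length := by
  fun_induction headsInner with
  | case1 j coins h ih => simpa using ih
  | case2 => rfl

-- index k is toggled iff i divides k+1 and the loop (currently at j) still reaches it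
lemma headsInner_getD (n i j : Int) (coins : List Bool) (hi : 1 ≤ i) :
    ∀ (_ : 1 ≤ j) (_ : (coins.length : Int) = n) (k : ℕ) (_ : k < coins.length),
    (headsInner n i j coins).getD k false =
      if i ∣ ((k : Int) + 1) ∧ i * j ≤ (k : Int) + 1 then ! coins.getD k false
      else coins.getD k false := by
  fun_induction headsInner with
  | case1 j coins h ih =>
    intro hj hlen k hk
    have hij1 : 1 ≤ i * j := by nlinarith [h.2]
    have hidx : ((i * j - 1).toNat : Int) = i * j - 1 := Int.toNat_of_nonneg (by omega)
    have hidxlt : (i * j - 1).toNat < coins.length := by omega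
    have hlen' : ((coins.set (i * j - 1).toNat (! coins.getD (i * j - 1).toNat false)).length : Int) = n := by
      simpa using hlen
    have ihk := ih (by omega) hlen' k (by simpa using hk)
    rw [ihk]
    by_cases hkidx : (i * j - 1).toNat = k
    · have hkeq : (k : Int) + 1 = i * j := by omega
      have hgt : ¬ (i ∣ ((k : Int) + 1) ∧ i * (j + 1) ≤ (k : Int) + 1) := by
        rintro ⟨-, hle⟩; nlinarith
      rw [if_neg hgt, getD_set_bool _ _ _ _ hidxlt, if_pos hkidx, hkidx,
        if_pos ⟨⟨j, hkeq⟩, le_of_eq hkeq.symm⟩]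
    · rw [getD_set_bool _ _ _ _ hidxlt, if_neg hkidx]
      by_cases hdvd : i ∣ ((k : Int) + 1)
      · obtain ⟨q, hq⟩ := hdvd
        have hq0 : 0 < q := by nlinarith [Nat.cast_nonneg (α := Int) k]
        by_cases hle : i * j ≤ (k : Int) + 1
        · have hjq : j ≤ q := by nlinarith
          have hjq' : j + 1 ≤ q := by
            rcases lt_or_eq_of_le hjq with h' | h'
            · omega
            · exfalso; subst h'; exact hkidx (by omega)
          rw [if_pos ⟨⟨q, hq⟩, by nlinarith⟩, if_pos ⟨⟨q, hq⟩, hle⟩]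
        · rw [if_neg (fun c => hle (le_trans (by nlinarith) c.2)),
            if_neg (fun c => hle c.2)]
      · rw [if_neg (fun c => hdvd c.1), if_neg (fun c => hdvd c.1)]
  | case2 j coins h =>
    intro hj hlen k hk
    have h2 : n < i * j := by
      rcases not_and_or.mp h with h' | h'
      · exact absurd hi h'
      · omega
    rw [if_neg]
    rintro ⟨-, hle⟩
    have : (k : Int) + 1 ≤ n := by omega
    omega

lemma headsAltInner_length (n k : Int) (coins : List Bool) :
    (headsAltInner n k coins).length = coins.length := by
  fun_induction headsAltInner with
  | case1 k coins h ih => simpa using ih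
  | case2 => rfl


lemma headsAltInner_getD (n k : Int) (coins : List Bool) :
    ∀ (_ : 1 ≤ k) (_ : (coins.length : Int) = n) (m : ℕ) (_ : m < coins.length),
    ((∃ t : Int, k ≤ t ∧ t * t = (m : Int) + 1) →
        (headsAltInner n k coins).getD m false = true) ∧
    (¬ (∃ t : Int, k ≤ t ∧ t * t = (m : Int) + 1) →
        (headsAltInner n k coins).getD m false = coins.getD m false) := by
  fun_induction headsAltInner with
  | case1 k coins h ih =>
    intro hk hlen m hm
    have hkk1 : 1 ≤ k * k := by nlinarith
    have hidx : ((k * k - 1).toNat : Int) = k * k - 1 := Int.toNat_of_nonneg (by omega)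
    have hidxlt : (k * k - 1).toNat < coins.length := by omega
    have ihm := ih (by omega) (by simpa using hlen) m (by simpa using hm)
    constructor
    · rintro ⟨t, ht, htt⟩
      by_cases htk : t = k
      · -- m is exactly k*k-1: marked by this step, stays true afterwards
        have hmidx : (k * k - 1).toNat = m := by subst htk; omega
        by_cases hnext : ∃ t' : Int, k + 1 ≤ t' ∧ t' * t' = (m : Int) + 1
        · exact ihm.1 hnext
        · rw [ihm.2 hnext, getD_set_bool _ _ _ _ hidxlt, if_pos hmidx]
      · exact ihm.1 ⟨t, by omega, htt⟩
    · intro hno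
      have hmidx : (k * k - 1).toNat ≠ m := by
        intro hc
        exact hno ⟨k, le_refl k, by omega⟩
      have hnext : ¬ ∃ t' : Int, k + 1 ≤ t' ∧ t' * t' = (m : Int) + 1 := by
        rintro ⟨t', ht', htt'⟩; exact hno ⟨t', by omega, htt'⟩
      rw [ihm.2 hnext, getD_set_bool _ _ _ _ hidxlt, if_neg hmidx]
  | case2 k coins h =>
    intro hk hlen m hm
    refine ⟨?_, fun _ => rfl⟩
    rintro ⟨t, ht, htt⟩
    exfalso
    have h2 : n < k * k := by
      rcases not_and_or.mp h with h' | h'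
      · exact absurd hk h'
      · omega
    have : k * k ≤ t * t := by nlinarith
    omega


-- number of divisors of v that lie in [2, m]
def divCnt (m v : ℕ) : ℕ := ((Finset.Icc 2 m).filter (· ∣ v)).card

-- invariant of A's outer loop after the rounds 2..m
lemma headsFold (n : Int) (hn : 1 ≤ n) (m : Int) (hm : 1 ≤ m) (hmn : m ≤ n) :
    ((PySem.List.pyRange 2 (m + 1) 1).foldl
        (fun coins i => headsInner n i 1 coins)
        (List.replicate n.toNat true)).length = n.toNat ∧
    ∀ k : ℕ, k < n.toNat →
      ((PySem.List.pyRange 2 (m + 1) 1).foldl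
          (fun coins i => headsInner n i 1 coins)
          (List.replicate n.toNat true)).getD k false =
        decide (Even (divCnt m.toNat (k + 1))) := by
  induction m, hm using Int.le_induction with
  | base =>
    rw [PySem.List.pyRange_one_eq_nil (by norm_num)]
    refine ⟨by simp, fun k hk => ?_⟩
    simp [List.foldl, divCnt, List.getD_eq_getElem?_getD, hk]
  | succ m hm ih =>
    have hmn' : m ≤ n := by omega
    obtain ⟨ihlen, ihval⟩ := ih hmn'
    rw [PySem.List.pyRange_one_succ_right (by omega), List.foldl_append]
    simp only [List.foldl_cons, List.foldl_nil]
    set st := (PySem.List.pyRange 2 (m + 1) 1).foldl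
        (fun coins i => headsInner n i 1 coins) (List.replicate n.toNat true) with hst
    have hstlen : (st.length : Int) = n := by rw [ihlen]; omega
    constructor
    · rw [headsInner_length, ihlen]
    · intro k hk
      have hkst : k < st.length := by omega
      rw [headsInner_getD n (m+1) 1 st (by omega) (by omega) hstlen k hkst]
      have hm1 : ((m+1).toNat : Int) = m + 1 := by omega
      have htn : (m+1).toNat = m.toNat + 1 := by omega
      have hdvd_iff : ((m+1) ∣ ((k : Int) + 1)) ↔ ((m.toNat + 1) ∣ (k + 1)) := by
        rw [← Int.natCast_dvd_natCast]
        push_cast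
        rw [show ((m.toNat : Int) + 1) = m + 1 by omega]
      have hicc : Finset.Icc 2 (m.toNat + 1) = insert (m.toNat + 1) (Finset.Icc 2 m.toNat) := by
        ext x; simp [Finset.mem_Icc]; omega
      have hnotmem : (m.toNat + 1) ∉ (Finset.Icc 2 m.toNat).filter (· ∣ (k + 1)) := by
        simp
      by_cases hdvd : (m+1) ∣ ((k : Int) + 1)
      · have hle : (m + 1) * 1 ≤ (k : Int) + 1 := by
          rw [mul_one]
          exact Int.le_of_dvd (by omega) hdvd
        rw [if_pos ⟨hdvd, hle⟩, ihval k hk]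
        have : divCnt (m+1).toNat (k+1) = divCnt m.toNat (k+1) + 1 := by
          rw [divCnt, htn, hicc, Finset.filter_insert, if_pos (hdvd_iff.mp hdvd),
            Finset.card_insert_of_notMem hnotmem, divCnt]
        rw [this]
        simp [Nat.even_add_one, ← Nat.not_odd_iff_even]
      · rw [if_neg (fun c => hdvd c.1), ihval k hk]
        have : divCnt (m+1).toNat (k+1) = divCnt m.toNat (k+1) := by
          rw [divCnt, htn, hicc, Finset.filter_insert,
            if_neg (fun c => hdvd (hdvd_iff.mpr c)), divCnt]
        rw [this]

-- 2·(# divisors below √V) + (1 if V is a square) = # divisors  ⇒  parity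
lemma odd_card_divisors_iff (V : ℕ) (hV : 1 ≤ V) :
    Odd V.divisors.card ↔ IsSquare V := by
  have hV0 : V ≠ 0 := by omega
  set L := V.divisors.filter (fun d => d * d < V) with hL
  set E := V.divisors.filter (fun d => d * d = V) with hE
  set H := V.divisors.filter (fun d => V < d * d) with hH
  have hsplit : V.divisors.card = L.card + (E.card + H.card) := by
    rw [← Finset.card_filter_add_card_filter_not (s := V.divisors) (p := fun d => d * d < V)]
    congr 1
    have : V.divisors.filter (fun d => ¬ d * d < V) = E ∪ H := by
      ext x
      simp only [Finset.mem_filter, Finset.mem_union, hE, hH]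
      constructor
      · rintro ⟨hx, hnlt⟩
        rcases Nat.lt_trichotomy (x * x) V with h | h | h
        · exact absurd h hnlt
        · exact Or.inl ⟨hx, h⟩
        · exact Or.inr ⟨hx, h⟩
      · rintro (⟨hx, h⟩ | ⟨hx, h⟩) <;> exact ⟨hx, by omega⟩
    rw [this, Finset.card_union_of_disjoint]
    · simp only [hE, hH, Finset.disjoint_filter]
      intro x _ h1 h2
      omega
  have hLH : L.card = H.card := by
    apply Finset.card_bij (fun d _ => V / d)
    · intro d hd
      rw [hL, Finset.mem_filter, Nat.mem_divisors] at hd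
      obtain ⟨⟨⟨c, hc⟩, -⟩, hdd⟩ := hd
      have hd0 : 0 < d := by
        rcases Nat.eq_zero_or_pos d with h | h
        · subst h; simp at hc; omega
        · exact h
      have hdc : V / d = c := by rw [hc, Nat.mul_div_cancel_left c hd0]
      rw [hH, Finset.mem_filter, Nat.mem_divisors, hdc]
      have hdc2 : d < c := by nlinarith
      exact ⟨⟨⟨d, by rw [hc]; ring⟩, hV0⟩, by nlinarith⟩
    · intro a ha b hb hab
      rw [hL, Finset.mem_filter, Nat.mem_divisors] at ha hb
      rw [← Nat.div_div_self ha.1.1 hV0, hab, Nat.div_div_self hb.1.1 hV0]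
    · intro e he
      rw [hH, Finset.mem_filter, Nat.mem_divisors] at he
      obtain ⟨⟨⟨c, hc⟩, -⟩, hee⟩ := he
      have he0 : 0 < e := by
        rcases Nat.eq_zero_or_pos e with h | h
        · subst h; simp at hc; omega
        · exact h
      have hec : V / e = c := by rw [hc, Nat.mul_div_cancel_left c he0]
      have hc0 : 0 < c := by
        rcases Nat.eq_zero_or_pos c with h | h
        · subst h; omega
        · exact h
      have hce : c < e := by nlinarith
      refine ⟨c, ?_, ?_⟩
      · rw [hL, Finset.mem_filter, Nat.mem_divisors]
        exact ⟨⟨⟨e, by rw [hc]; ring⟩, hV0⟩, by nlinarith⟩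
      · rw [show V / c = V / (V / e) by rw [hec], Nat.div_div_self ⟨c, hc⟩ hV0]
  by_cases hsq : IsSquare V
  · obtain ⟨r, hr⟩ := hsq
    have hEr : E = {r} := by
      ext d
      rw [hE, Finset.mem_filter, Nat.mem_divisors, Finset.mem_singleton]
      constructor
      · rintro ⟨-, hdd⟩
        exact Nat.mul_self_inj.mp (by rw [hdd, hr])
      · intro h
        rw [h]
        exact ⟨⟨⟨r, hr⟩, hV0⟩, hr.symm⟩
    rw [hsplit, hLH, hEr]
    simp only [Finset.card_singleton]
    constructor
    · intro _; exact ⟨r, hr⟩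
    · intro _; exact ⟨H.card, by ring⟩
  · have hE0 : E = ∅ := by
      ext d
      rw [hE, Finset.mem_filter]
      simp only [Finset.notMem_empty, iff_false]
      rintro ⟨-, hdd⟩
      exact hsq ⟨d, hdd.symm⟩
    rw [hsplit, hLH, hE0]
    simp only [Finset.card_empty, Nat.zero_add]
    constructor
    · rintro ⟨c, hc⟩
      omega
    · intro h; exact absurd h hsq

lemma divCnt_card (n v : ℕ) (hv : 1 ≤ v) (hvn : v ≤ n) :
    divCnt n v = v.divisors.card - 1 := by
  have hv0 : v ≠ 0 := by omega
  have : (Finset.Icc 2 n).filter (· ∣ v) = v.divisors.erase 1 := by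
    ext d
    rw [Finset.mem_filter, Finset.mem_Icc, Finset.mem_erase, Nat.mem_divisors]
    constructor
    · rintro ⟨⟨h2, -⟩, hd⟩
      exact ⟨by omega, hd, hv0⟩
    · rintro ⟨h1, hd, -⟩
      have hd0 : d ≠ 0 := by
        rintro rfl
        rw [Nat.zero_dvd] at hd
        omega
      have := Nat.le_of_dvd (by omega) hd
      exact ⟨⟨by omega, by omega⟩, hd⟩
  rw [divCnt, this, Finset.card_erase_of_mem (Nat.one_mem_divisors.mpr hv0)]

lemma even_divCnt_iff (n v : ℕ) (hv : 1 ≤ v) (hvn : v ≤ n) :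
    Even (divCnt n v) ↔ ∃ t : Int, 1 ≤ t ∧ t * t = (v : Int) := by
  have hcard : 1 ≤ v.divisors.card :=
    Finset.card_pos.mpr ⟨1, Nat.one_mem_divisors.mpr (by omega)⟩
  rw [divCnt_card n v hv hvn, Nat.even_sub hcard,
    show ((Even v.divisors.card ↔ Even 1) ↔ Odd v.divisors.card) by
      constructor
      · intro h; rw [Nat.odd_iff]; rcases Nat.even_or_odd v.divisors.card with he | ho
        · exfalso; have := h.mp he; simp [Nat.even_iff] at this
        · exact Nat.odd_iff.mp ho
      · intro h; constructor
        · intro he; exact absurd he (Nat.not_even_iff_odd.mpr h)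
        · intro h1; exact absurd h1 (by decide),
    odd_card_divisors_iff v hv]
  constructor
  · rintro ⟨r, hr⟩
    have hr1 : 1 ≤ r := by
      rcases Nat.eq_zero_or_pos r with h | h
      · subst h; simp at hr; omega
      · exact h
    exact ⟨(r : Int), by exact_mod_cast hr1, by rw [hr]; push_cast; ring⟩
  · rintro ⟨t, ht, htt⟩
    refine ⟨t.toNat, ?_⟩
    have : (t.toNat : Int) = t := Int.toNat_of_nonneg (by omega)
    have : ((t.toNat * t.toNat : ℕ) : Int) = (v : Int) := by push_cast [this]; exact htt
    exact_mod_cast this.symm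

-- ===== VERDICT (by name: the statement is the Claim_ definition above) =====
theorem heads_spec : Claim_equal_heads := by
  intro n _
  unfold Spec_heads heads heads_alt
  by_cases hn : 1 ≤ n
  · obtain ⟨hlenA, hvalA⟩ := headsFold n hn n hn le_rfl
    have hlenB : (headsAltInner n 1 (List.replicate n.toNat false)).length = n.toNat := by
      rw [headsAltInner_length, List.length_replicate]
    apply List.ext_getElem (by rw [hlenA, hlenB])
    intro k h1 h2
    have hk : k < n.toNat := by rwa [hlenA] at h1
    rw [← List.getD_eq_getElem _ false h1, ← List.getD_eq_getElem _ false h2,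
      hvalA k hk]
    have hB := headsAltInner_getD n 1 (List.replicate n.toNat false) le_rfl
      (by rw [List.length_replicate]; omega) k (by rw [List.length_replicate]; exact hk)
    by_cases hex : ∃ t : Int, 1 ≤ t ∧ t * t = (k : Int) + 1
    · rw [hB.1 hex]
      have hex' : ∃ t : Int, 1 ≤ t ∧ t * t = ((k + 1 : ℕ) : Int) := by push_cast; exact hex
      have := (even_divCnt_iff n.toNat (k + 1) (by omega) (by omega)).mpr hex'
      simp [this]
    · rw [hB.2 hex]
      have hex' : ¬ ∃ t : Int, 1 ≤ t ∧ t * t = ((k + 1 : ℕ) : Int) := by push_cast; exact hex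
      have := (even_divCnt_iff n.toNat (k + 1) (by omega) (by omega)).not.mpr hex'
      simp [this, List.getD_eq_getElem?_getD, hk]
  · have h0 : n.toNat = 0 := by omega
    rw [PySem.List.pyRange_one_eq_nil (by omega), h0]
    simp only [List.replicate, List.foldl_nil]
    rw [headsAltInner, dif_neg]
    rintro ⟨-, hle⟩
    omega
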